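-- pv_equiv track=rewrite | github.com/kyungwon-dev/Algorithm_Solved | 프로그래머스/0/181921. 배열 만들기 2/배열 만들기 2.py | solution
-- ===== SOURCE A (Python) =====
-- def solution(l, r):
--     answer = []
--     for i in range(1,64,1):
--         if l <= int(bin(i)[2:])*5 <= r:
--             answer.append(int(bin(i)[2:])*5)
--     if not answer:
--         answer.append(-1)
--
--     return answer
-- ===== SOURCE B (Python) =====
-- def solution(l, r):
--     # Generate all 1..6-digit numbers made of digits 0/5 by expansion (no binary decoding).
--     nums = []
--     frontier = [5]
--     for _ in range(6):
--         nums.extend(frontier)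
--         frontier = [d for n in frontier for d in (n * 10, n * 10 + 5)]
--     answer = sorted(n for n in nums if l <= n <= r)
--     if not answer:
--         answer.append(-1)
--     return answer
-- ===== Notes on version B (the rewrite author's own statement) =====
-- stated objective: idiomatic
-- what changed: B generates the 1..6-digit numbers made of digits 0/5 directly by repeated digit expansion (n -> n*10, n*10+5 from a frontier starting at [5]) and sorts the in-range ones, instead of A's decoding of bin(i) for i in 1..63 as a decimal number times 5.
import Mathlib
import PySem

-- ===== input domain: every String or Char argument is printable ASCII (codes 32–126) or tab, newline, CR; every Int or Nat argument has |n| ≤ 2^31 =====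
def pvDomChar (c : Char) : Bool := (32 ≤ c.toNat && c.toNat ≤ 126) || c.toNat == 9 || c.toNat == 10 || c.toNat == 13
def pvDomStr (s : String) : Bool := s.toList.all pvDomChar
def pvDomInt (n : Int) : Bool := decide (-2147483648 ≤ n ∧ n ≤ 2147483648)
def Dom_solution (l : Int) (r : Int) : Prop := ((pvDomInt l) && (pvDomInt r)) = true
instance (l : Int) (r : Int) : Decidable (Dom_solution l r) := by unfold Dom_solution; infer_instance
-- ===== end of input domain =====

-- B generates the 0/5-digit numbers by digit expansion instead of decoding binary(i); same values, same order (idiomatic rewrite, no speed claim).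

-- ===== PORT A =====
-- int(bin(i)[2:]) ported by hand (no PySem bin): the decimal reading of i's binary
-- digits; exact for every i ≥ 1 that the loop visits (and 0 for i = 0, unused).
-- (fuel = n makes the recursion structural, hence kernel-reducible; binDecGo n n
-- computes exactly the same div/mod recursion the Python digit reading performs)
def binDecGo : Nat → Nat → Int
  | 0, _ => 0
  | _ + 1, 0 => 0
  | f + 1, n + 1 => binDecGo f ((n + 1) / 2) * 10 + ((n + 1) % 2)

def binDec (n : Nat) : Int := binDecGo n n

def solution (l : Int) (r : Int) : List Int :=
  let answer := (PySem.List.pyRange 1 64 1).foldl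
    (fun answer i =>
      if l ≤ binDec i.toNat * 5 ∧ binDec i.toNat * 5 ≤ r then
        answer ++ [binDec i.toNat * 5]
      else answer) []
  if answer = [] then answer ++ [-1] else answer

-- ===== PORT B =====
def solution_alt (l : Int) (r : Int) : List Int :=
  let st := (List.range 6).foldl
    (fun (st : List Int × List Int) _ =>
      (st.1 ++ st.2, st.2.flatMap (fun n => [n * 10, n * 10 + 5])))
    ([], [5])
  let answer := PySem.List.sorted
    (st.1.filter (fun n => decide (l ≤ n) && decide (n ≤ r))) (fun x => x) false
  if answer = [] then answer ++ [-1] else answer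

-- ===== PRECONDITION & SPEC =====
def Spec_solution (l : Int) (r : Int) (out : List Int) : Prop := out = solution_alt l r
instance (l : Int) (r : Int) (out : List Int) : Decidable (Spec_solution l r out) := by unfold Spec_solution; infer_instance

-- ===== CLAIM (what is proved, stated in full; the proofs are below) =====
def Claim_equal_solution : Prop := ∀ (l : Int) (r : Int), Dom_solution l r → Spec_solution l r (solution l r)

-- ===== LEMMAS AND PROOFS =====

-- A's enumeration order (i = 1..63 under int(bin(i))·5) and B's expansion order
-- (by digit count, then within a round) produce the SAME literal list of 63 numbers.
theorem nums_eq :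
    ((List.range 6).foldl
      (fun (st : List Int × List Int) _ =>
        (st.1 ++ st.2, st.2.flatMap (fun n => [n * 10, n * 10 + 5])))
      ([], [5])).1
    = (PySem.List.pyRange 1 64 1).map (fun i => binDec i.toNat * 5) := by decide

theorem nums_pairwise :
    ((PySem.List.pyRange 1 64 1).map (fun i => binDec i.toNat * 5)).Pairwise (· ≤ ·) := by
  decide

-- map/filter exchange: filtering on p ∘ f then mapping f = mapping f then filtering p
theorem filter_map_comm {α β : Type} (f : α → β) (p : β → Bool) (L : List α) :
    (L.map f).filter p = (L.filter (fun x => p (f x))).map f := by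
  induction L with
  | nil => rfl
  | cons a t ih => simp [List.map, List.filter]; cases p (f a) <;> simp [ih]

theorem core_eq (l r : Int) :
    (PySem.List.pyRange 1 64 1).foldl
      (fun answer i =>
        if l ≤ binDec i.toNat * 5 ∧ binDec i.toNat * 5 ≤ r then
          answer ++ [binDec i.toNat * 5]
        else answer) []
    = PySem.List.sorted
        ((((List.range 6).foldl
            (fun (st : List Int × List Int) _ =>
              (st.1 ++ st.2, st.2.flatMap (fun n => [n * 10, n * 10 + 5])))
            ([], [5])).1).filter (fun n => decide (l ≤ n) && decide (n ≤ r)))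
        (fun x => x) false := by
  have hA := PySem.List.foldl_append_ite
        (p := fun i : Int => l ≤ binDec i.toNat * 5 ∧ binDec i.toNat * 5 ≤ r)
        (f := fun i : Int => binDec i.toNat * 5)
        (PySem.List.pyRange 1 64 1) []
  rw [hA, nums_eq,
      PySem.List.sorted_eq_self_of_pairwise _ _ (List.Pairwise.filter _ nums_pairwise),
      filter_map_comm]
  simp [Bool.decide_and]

theorem solution_eq_alt (l r : Int) : solution l r = solution_alt l r := by
  have h := core_eq l r
  show (if _ = ([] : List Int) then _ ++ [-1] else _) =
       (if _ = ([] : List Int) then _ ++ [-1] else _)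
  rw [h]

-- ===== VERDICT (by name: the statement is the Claim_ definition above) =====
theorem solution_spec : Claim_equal_solution := by
  intro l r _
  unfold Spec_solution
  exact solution_eq_alt l r
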